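-- pv_equiv track=rewrite | github.com/crumpstrr33/CFOP-cube-solver | algorithms/tools.py | alg_output
-- ===== SOURCE A (Python) =====
-- def alg_output(alg):
--     """
--     Returns a string for an algorithm with spaces between each move for easy
--     readability.
--
--     Parameters:
--     alg - Algorithm to add spaces to
--     """
--     proper_alg = ''
--     alg_len = len(alg)
--
--     for n, c in enumerate(alg):
--         proper_alg += c
--
--         if n + 1 != alg_len:
--             if alg[n + 1] not in ["2", "'"]:
--                 proper_alg += ' '
--
--     return proper_alg
-- ===== SOURCE B (Python) =====
-- def alg_output(alg):
--     """
--     Returns a string for an algorithm with spaces between each move for easy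
--     readability.
--
--     Parameters:
--     alg - Algorithm to add spaces to
--     """
--     tokens = []
--     for c in alg:
--         if c in "2'" and tokens:
--             tokens[-1] += c
--         else:
--             tokens.append(c)
--     return ' '.join(tokens)
-- ===== Notes on version B (the rewrite author's own statement) =====
-- stated objective: simpler
-- what changed: Replaces the enumerate-with-lookahead loop that peeks at the next character to decide whether to append a space with a tokenizer that glues move modifiers onto the previous token and joins the tokens once at the end.
import Mathlib
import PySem

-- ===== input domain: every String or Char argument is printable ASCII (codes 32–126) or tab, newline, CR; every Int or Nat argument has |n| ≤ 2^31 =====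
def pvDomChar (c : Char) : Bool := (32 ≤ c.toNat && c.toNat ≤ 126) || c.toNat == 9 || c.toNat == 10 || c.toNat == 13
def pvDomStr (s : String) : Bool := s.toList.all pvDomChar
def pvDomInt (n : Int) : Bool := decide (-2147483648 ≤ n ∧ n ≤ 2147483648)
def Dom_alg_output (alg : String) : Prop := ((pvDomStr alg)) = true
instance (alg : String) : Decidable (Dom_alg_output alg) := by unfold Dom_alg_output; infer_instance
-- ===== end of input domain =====

-- B tokenizes the moves and joins them with spaces instead of A's lookahead-and-space loop ('simpler').

-- ===== PORT A =====
-- one step of A's loop body: proper_alg += c; then maybe += ' ' after peeking at alg[n+1]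
def algA_step (l : List Char) (acc : List Char) (nc : Int × Char) : List Char :=
  let acc := acc ++ [nc.2]
  if nc.1 + 1 ≠ (l.length : Int) then
    if ¬ (PySem.List.pyGetD l (nc.1 + 1) ' ' = '2' ∨ PySem.List.pyGetD l (nc.1 + 1) ' ' = '\'') then
      acc ++ [' ']
    else acc
  else acc

def alg_output (alg : String) : String :=
  String.ofList ((PySem.List.enumerate alg.toList 0).foldl (algA_step alg.toList) [])

-- ===== PORT B =====
-- tokens[-1] += c
def extendLast : List (List Char) → Char → List (List Char)
  | [], _ => []
  | [t], c => [t ++ [c]]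
  | t :: ts, c => t :: extendLast ts c

-- one step of B's loop body
def algB_step (toks : List (List Char)) (c : Char) : List (List Char) :=
  if (c = '2' ∨ c = '\'') ∧ toks ≠ [] then extendLast toks c
  else toks ++ [[c]]

def alg_output_alt (alg : String) : String :=
  String.ofList (PySem.Chars.join [' '] (alg.toList.foldl algB_step []))

-- ===== PRECONDITION & SPEC =====
def Spec_alg_output (alg : String) (out : String) : Prop := out = alg_output_alt alg
instance (alg : String) (out : String) : Decidable (Spec_alg_output alg out) := by unfold Spec_alg_output; infer_instance

-- ===== CLAIM (what is proved, stated in full; the proofs are below) =====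
def Claim_equal_alg_output : Prop := ∀ (alg : String), Dom_alg_output alg → Spec_alg_output alg (alg_output alg)

-- ===== LEMMAS AND PROOFS =====

-- the common "continuation" string after the first character
def tailStr : List Char → List Char
  | [] => []
  | c :: r => (if c = '2' ∨ c = '\'' then [c] else [' ', c]) ++ tailStr r

-- A-side unrolling
lemma algA_unroll (L : List Char) :
    ∀ (suf pre : List Char), L = pre ++ suf → ∀ (acc : List Char),
      (PySem.List.enumerate suf (pre.length : Int)).foldl (algA_step L) acc
        = acc ++ (match suf with
                  | [] => []
                  | c :: r => c :: tailStr r) := by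
  intro suf
  induction suf with
  | nil => intro pre h acc; simp [PySem.List.enumerate_nil]
  | cons c r ih =>
    intro pre h acc
    rw [PySem.List.enumerate_cons, List.foldl_cons]
    have hstep : algA_step L acc ((pre.length : Int), c)
        = acc ++ [c] ++ (match r with
                         | [] => []
                         | d :: _ => if d = '2' ∨ d = '\'' then [] else [' ']) := by
      subst h
      unfold algA_step
      cases r with
      | nil => simp
      | cons d r' =>
        have hne : ((pre.length : Int) + 1) ≠ ((pre ++ c :: d :: r').length : Int) := by
          simp only [List.length_append, List.length_cons]; push_cast; omega
        have hget : PySem.List.pyGetD (pre ++ c :: d :: r') ((pre.length : Int) + 1) ' ' = d := by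
          have : ((pre.length : Int) + 1) = ((pre.length + 1 : Nat) : Int) := by push_cast; ring
          rw [this, PySem.List.pyGetD_natCast]
          have hlt : pre.length + 1 < (pre ++ c :: d :: r').length := by
            simp only [List.length_append, List.length_cons]; omega
          rw [List.getD_eq_getElem _ _ hlt]
          simp [List.getElem_append_right (Nat.le_succ_of_le (Nat.le_refl _))]
        rw [if_pos hne, hget]
        by_cases hd : d = '2' ∨ d = '\''
        · simp [hd]
        · simp [hd]
    rw [hstep]
    have hpre : ((pre.length : Int) + 1) = (((pre ++ [c]).length : Nat) : Int) := by
      simp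
    rw [hpre, ih (pre ++ [c]) (by simp [h]) _]
    cases r with
    | nil => simp [tailStr]
    | cons d r' =>
      by_cases hd : d = '2' ∨ d = '\'' <;> simp [tailStr, hd]

-- B-side: extendLast appends to the last token
lemma extendLast_append (ts : List (List Char)) (t : List Char) (c : Char) :
    extendLast (ts ++ [t]) c = ts ++ [t ++ [c]] := by
  induction ts with
  | nil => rfl
  | cons x xs ih =>
    cases xs with
    | nil => rfl
    | cons y ys => exact congrArg (List.cons x) ih

-- B-side: the fold with current last token t
def tokGo (t : List Char) : List Char → List (List Char)
  | [] => [t]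
  | c :: r => if c = '2' ∨ c = '\'' then tokGo (t ++ [c]) r else t :: tokGo [c] r

lemma tokGo_ne_nil (l : List Char) : ∀ t, tokGo t l ≠ [] := by
  induction l with
  | nil => intro t; simp [tokGo]
  | cons c r ih =>
    intro t
    by_cases h : c = '2' ∨ c = '\''
    · simp only [tokGo, if_pos h]; exact ih _
    · simp [tokGo, h]

lemma algB_fold (l : List Char) :
    ∀ (ts : List (List Char)) (t : List Char),
      List.foldl algB_step (ts ++ [t]) l = ts ++ tokGo t l := by
  induction l with
  | nil => intro ts t; simp [tokGo]
  | cons c r ih =>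
    intro ts t
    rw [List.foldl_cons]
    by_cases h : c = '2' ∨ c = '\''
    · have : algB_step (ts ++ [t]) c = ts ++ [t ++ [c]] := by
        simp [algB_step, h, extendLast_append]
      rw [this, ih ts (t ++ [c])]
      simp [tokGo, h]
    · have : algB_step (ts ++ [t]) c = (ts ++ [t]) ++ [[c]] := by
        simp [algB_step, h]
      rw [this, ih (ts ++ [t]) [c]]
      simp [tokGo, h]

lemma join_tokGo (l : List Char) :
    ∀ t, PySem.Chars.join [' '] (tokGo t l) = t ++ tailStr l := by
  induction l with
  | nil => intro t; simp [tokGo, tailStr, PySem.Chars.join_singleton]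
  | cons c r ih =>
    intro t
    by_cases h : c = '2' ∨ c = '\''
    · simp only [tokGo, if_pos h]
      rw [ih (t ++ [c])]
      simp [tailStr, h]
    · simp only [tokGo, if_neg h]
      cases hg : tokGo [c] r with
      | nil => exact absurd hg (tokGo_ne_nil r [c])
      | cons x xs =>
        rw [PySem.Chars.join_cons_cons]
        have := ih [c]
        rw [hg] at this
        rw [this]
        simp [tailStr, h]

-- ===== VERDICT (by name: the statement is the Claim_ definition above) =====
theorem alg_output_spec : Claim_equal_alg_output := by
  intro alg _
  unfold Spec_alg_output alg_output alg_output_alt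
  congr 1
  cases hl : alg.toList with
  | nil => simp [PySem.List.enumerate_nil, PySem.Chars.join_nil]
  | cons c r =>
    have hA := algA_unroll (c :: r) (c :: r) [] rfl []
    simp only [List.nil_append, List.length_nil, Nat.cast_zero] at hA
    rw [hA]
    have hstep : algB_step [] c = [[c]] := by simp [algB_step]
    rw [List.foldl_cons, hstep]
    have := algB_fold r [] [c]
    simp only [List.nil_append] at this
    rw [this, join_tokGo]
    rfl
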